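-- pv_equiv track=rewrite | github.com/benrap/Assembly2Brainfuck | converters/HBF2BF.py | setb_brainfuck
-- ===== SOURCE A (Python) =====
-- def setb_brainfuck(code, n, m):
-- 	parts = code.split("(setb")
-- 	new_code = parts[0]
-- 	for part in parts[1:]:
-- 		new_code += "(zero)"
-- 		sub_parts = part.split(")")
-- 		rest = ")".join(sub_parts[1:])
-- 		for digit in sub_parts[0][::-1]:
-- 			if (digit == "1"):
-- 				new_code += "+"
-- 			new_code += "(up)"
-- 		new_code += "(down)" * len(sub_parts[0]) + rest
-- 	return new_code
-- ===== SOURCE B (Python) =====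
-- def setb_brainfuck(code, n, m):
--     # Single left-to-right scan: copy characters until a "(setb" token starts,
--     # then collect its digits (ended by ")", by a new "(setb", or by end of
--     # input) and emit its brainfuck expansion in place.
--     out = []
--     i = 0
--     size = len(code)
--     while i < size:
--         if code.startswith("(setb", i):
--             i += 5
--             digits = []
--             while i < size and code[i] != ")" and not code.startswith("(setb", i):
--                 digits.append(code[i])
--                 i += 1
--             if i < size and code[i] == ")":
--                 i += 1
--             out.append("(zero)")
--             for d in reversed(digits):
--                 if d == "1":
--                     out.append("+")
--                 out.append("(up)")
--             out.append("(down)" * len(digits))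
--         else:
--             out.append(code[i])
--             i += 1
--     return "".join(out)
-- ===== Notes on version B (the rewrite author's own statement) =====
-- stated objective: alternative
-- what changed: Replaces A's split-on-"(setb" / split-on-")" / re-join string surgery with a single left-to-right state-machine scan that copies characters and expands each (setb token as it is reached.
import Mathlib
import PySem

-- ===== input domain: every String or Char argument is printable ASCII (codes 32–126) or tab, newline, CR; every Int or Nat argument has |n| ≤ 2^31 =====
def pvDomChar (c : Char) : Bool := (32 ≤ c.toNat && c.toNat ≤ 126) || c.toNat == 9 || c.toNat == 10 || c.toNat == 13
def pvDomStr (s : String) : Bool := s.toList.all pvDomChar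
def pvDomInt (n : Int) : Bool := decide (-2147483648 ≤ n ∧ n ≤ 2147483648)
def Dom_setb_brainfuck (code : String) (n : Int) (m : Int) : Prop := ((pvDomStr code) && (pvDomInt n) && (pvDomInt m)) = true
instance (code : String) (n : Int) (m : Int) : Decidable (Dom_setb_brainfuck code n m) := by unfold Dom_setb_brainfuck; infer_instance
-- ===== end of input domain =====

-- B replaces A's split-on-"(setb" / split-on-")" / re-join string surgery by a single
-- left-to-right character scan that expands each (setb token as it is reached (alternative, same cost).

-- ===== PORT A =====
def setb_brainfuck (code : String) (n : Int) (m : Int) : String :=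
  let parts := PySem.Chars.splitOn code.toList "(setb".toList
  -- parts[0]: str.split always returns a nonempty list, so headD [] is Python's parts[0]
  let new_code := parts.headD []
  String.ofList <|
    (parts.drop 1).foldl (fun new_code part =>
      let new_code := new_code ++ "(zero)".toList
      let sub_parts := PySem.Chars.splitOn part [')']
      let rest := PySem.Chars.join [')'] (sub_parts.drop 1)
      let sub0 := sub_parts.headD []   -- sub_parts[0], again always nonempty
      -- sub0[::-1]: step -1 ≠ 0, so slice? is always `some` (PySem.List.slice?_none_none_neg_one)
      let new_code := ((PySem.List.slice? sub0 none none (-1)).getD []).foldl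
        (fun nc digit => (if digit = '1' then nc ++ ['+'] else nc) ++ "(up)".toList) new_code
      new_code ++ (List.replicate sub0.length "(down)".toList).flatten ++ rest) new_code

-- ===== PORT B =====
-- the inner `while` loop of Source B: collect digits until ")", a new "(setb", or end of input;
-- returns (digits, remaining input after the token)
def pvScanTok : List Char → List Char × List Char
  | [] => ([], [])
  | c :: cs =>
    if c = ')' then ([], cs)
    else if "(setb".toList.isPrefixOf (c :: cs) then ([], c :: cs)
    else
      let p := pvScanTok cs
      (c :: p.1, p.2)

-- termination helper for pvScan (the scanner resumes strictly later in the input)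
theorem pvScanTok_snd_length_le : ∀ l : List Char, (pvScanTok l).2.length ≤ l.length := by
  intro l
  induction l with
  | nil => simp [pvScanTok]
  | cons c cs ih =>
      simp only [pvScanTok]
      split_ifs <;> simp <;> omega

-- the outer `while` loop of Source B
def pvScan : List Char → List Char
  | [] => []
  | c :: cs =>
    if "(setb".toList.isPrefixOf (c :: cs) then
      let p := pvScanTok (cs.drop 4)   -- skip the 5 chars of "(setb"
      "(zero)".toList
        ++ p.1.reverse.foldl (fun o d => (if d = '1' then o ++ ['+'] else o) ++ "(up)".toList) []
        ++ (List.replicate p.1.length "(down)".toList).flatten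
        ++ pvScan p.2
    else c :: pvScan cs
termination_by l => l.length
decreasing_by
  · have h1 := pvScanTok_snd_length_le (cs.drop 4)
    have h2 : (cs.drop 4).length ≤ cs.length := by simp
    simp only [List.length_cons]
    omega
  · simp

def setb_brainfuck_alt (code : String) (n : Int) (m : Int) : String :=
  String.ofList (pvScan code.toList)

-- ===== PRECONDITION & SPEC =====
def Spec_setb_brainfuck (code : String) (n : Int) (m : Int) (out : String) : Prop := out = setb_brainfuck_alt code n m
instance (code : String) (n : Int) (m : Int) (out : String) : Decidable (Spec_setb_brainfuck code n m out) := by unfold Spec_setb_brainfuck; infer_instance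

-- ===== CLAIM (what is proved, stated in full; the proofs are below) =====
def Claim_equal_setb_brainfuck : Prop := ∀ (code : String) (n : Int) (m : Int), Dom_setb_brainfuck code n m → Spec_setb_brainfuck code n m (setb_brainfuck code n m)

-- ===== LEMMAS AND PROOFS =====

-- fuel-free reference version of str.split(sep) (sep ≠ "")
def mySplit (sep : List Char) : List Char → List (List Char)
  | [] => [[]]
  | c :: rest =>
    if sep.isPrefixOf (c :: rest) then [] :: mySplit sep (rest.drop (sep.length - 1))
    else
      match mySplit sep rest with
      | [] => [[c]]
      | h :: t => (c :: h) :: t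
termination_by l => l.length
decreasing_by
  · simp only [List.length_cons]
    have : (rest.drop (sep.length - 1)).length ≤ rest.length := by simp
    omega
  · simp

theorem mySplit_ne_nil (sep l) : mySplit sep l ≠ [] := by
  cases l with
  | nil => simp [mySplit]
  | cons c rest =>
      rw [mySplit]
      split_ifs
      · simp
      · cases h : mySplit sep rest <;> simp

theorem mySplit_expand (sep t) :
    mySplit sep t = (mySplit sep t).headD [] :: (mySplit sep t).drop 1 := by
  cases h : mySplit sep t with
  | nil => exact absurd h (mySplit_ne_nil sep t)
  | cons a b => simp

theorem go_eq (sep : List Char) (hsep : sep ≠ []) :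
    ∀ (fuel : Nat) (l cur : List Char) (acc : List (List Char)), l.length < fuel →
      PySem.Chars.splitOn.go sep fuel l cur acc
        = acc.reverse ++ (cur.reverse ++ (mySplit sep l).headD []) :: (mySplit sep l).drop 1 := by
  intro fuel
  induction fuel with
  | zero => intro l cur acc h; exact absurd h (by omega)
  | succ f ih =>
      intro l cur acc h
      have hsl : 1 ≤ sep.length := List.length_pos_iff.mpr hsep
      cases l with
      | nil => simp [PySem.Chars.splitOn.go, mySplit]
      | cons c rest =>
          by_cases hp : sep.isPrefixOf (c :: rest)
          · have hlen : ((c :: rest).drop sep.length).length < f := by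
              have := List.length_drop (l := c :: rest) (i := sep.length)
              simp only [List.length_cons] at h this
              have hple := (List.isPrefixOf_iff_prefix.mp hp).length_le
              simp only [List.length_cons] at hple
              omega
            have hdrop : (c :: rest).drop sep.length = rest.drop (sep.length - 1) := by
              obtain ⟨k, hk⟩ : ∃ k, sep.length = k + 1 := ⟨sep.length - 1, by omega⟩
              simp [hk]
            rw [show PySem.Chars.splitOn.go sep (f + 1) (c :: rest) cur acc
                  = PySem.Chars.splitOn.go sep f ((c :: rest).drop sep.length) []
                      (cur.reverse :: acc) by
                simp [PySem.Chars.splitOn.go, hp]]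
            rw [ih _ _ _ hlen, hdrop]
            rw [show mySplit sep (c :: rest) = [] :: mySplit sep (rest.drop (sep.length - 1)) by
                rw [mySplit]; rw [if_pos hp]]
            cases hX : mySplit sep (rest.drop (sep.length - 1)) with
            | nil => exact absurd hX (mySplit_ne_nil _ _)
            | cons a b => simp
          · have hlen : rest.length < f := by simp only [List.length_cons] at h; omega
            rw [show PySem.Chars.splitOn.go sep (f + 1) (c :: rest) cur acc
                  = PySem.Chars.splitOn.go sep f rest (c :: cur) acc by
                simp [PySem.Chars.splitOn.go, hp]]
            rw [ih _ _ _ hlen]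
            rw [show mySplit sep (c :: rest)
                  = match mySplit sep rest with
                    | [] => [[c]]
                    | h :: t => (c :: h) :: t by rw [mySplit]; rw [if_neg hp]]
            cases hX : mySplit sep rest with
            | nil => exact absurd hX (mySplit_ne_nil _ _)
            | cons a b => simp

theorem splitOn_eq_mySplit (sep : List Char) (hsep : sep ≠ []) (l : List Char) :
    PySem.Chars.splitOn l sep = mySplit sep l := by
  have := go_eq sep hsep (l.length + 1) l [] [] (by omega)
  simp only [PySem.Chars.splitOn] at *
  rw [this]
  simpa using (mySplit_expand sep l).symm

theorem join_mySplit (x : List Char) :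
    PySem.Chars.join [')'] (mySplit [')'] x) = x := by
  induction x with
  | nil => rw [mySplit]; decide
  | cons c rest ih =>
      rw [mySplit]
      by_cases hc : List.isPrefixOf [')'] (c :: rest)
      · have hc2 : ')' = c := by simpa [List.isPrefixOf] using hc
        rw [if_pos hc]
        simp only [List.length_cons, List.length_nil, Nat.zero_add, Nat.sub_self, List.drop_zero]
        cases hX : mySplit [')'] rest with
        | nil => exact absurd hX (mySplit_ne_nil _ _)
        | cons a b =>
            rw [PySem.Chars.join_cons_cons]
            rw [hX] at ih
            rw [ih, ← hc2]
            simp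
      · rw [if_neg hc]
        cases hX : mySplit [')'] rest with
        | nil => exact absurd hX (mySplit_ne_nil _ _)
        | cons a b =>
            rw [hX] at ih
            cases b with
            | nil => simp only [PySem.Chars.join_singleton] at ih ⊢; simp [ih]
            | cons b1 b2 =>
                rw [PySem.Chars.join_cons_cons] at ih
                rw [PySem.Chars.join_cons_cons]
                simp [← ih]

-- the digit loop, factored
def pvExpand (ds : List Char) : List Char :=
  (ds.reverse.map (fun d => (if d = '1' then ['+'] else []) ++ "(up)".toList)).flatten

theorem foldl_digits (ds init : List Char) :
    ds.foldl (fun o d => (if d = '1' then o ++ ['+'] else o) ++ "(up)".toList) init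
      = init ++ (ds.map (fun d => (if d = '1' then ['+'] else []) ++ "(up)".toList)).flatten := by
  induction ds generalizing init with
  | nil => simp
  | cons d ds ih =>
      simp only [List.foldl_cons, List.map_cons, List.flatten_cons, ih]
      by_cases h : d = '1' <;> simp [h]

-- what A appends for one "(setb"-part
def pvBody (part : List Char) : List Char :=
  "(zero)".toList ++ pvExpand ((mySplit [')'] part).headD [])
    ++ (List.replicate ((mySplit [')'] part).headD []).length "(down)".toList).flatten
    ++ PySem.Chars.join [')'] ((mySplit [')'] part).drop 1)

def pvTail (ps : List (List Char)) : List Char := (ps.map pvBody).flatten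

theorem foldA_eq (ps : List (List Char)) (init : List Char) :
    ps.foldl (fun new_code part =>
      ((PySem.List.slice? ((PySem.Chars.splitOn part [')']).headD []) none none (-1)).getD []).foldl
        (fun nc digit => (if digit = '1' then nc ++ ['+'] else nc) ++ "(up)".toList)
        (new_code ++ "(zero)".toList)
      ++ (List.replicate ((PySem.Chars.splitOn part [')']).headD []).length "(down)".toList).flatten
      ++ PySem.Chars.join [')'] ((PySem.Chars.splitOn part [')']).drop 1))
      init
    = init ++ pvTail ps := by
  induction ps generalizing init with
  | nil => simp [pvTail]
  | cons p ps ih =>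
      rw [List.foldl_cons, ih]
      simp only [splitOn_eq_mySplit [')'] (by decide), PySem.List.slice?_none_none_neg_one,
        Option.getD_some, foldl_digits]
      simp [pvTail, pvBody, pvExpand, List.append_assoc]

theorem A_char (code : String) (n m : Int) :
    setb_brainfuck code n m
      = String.ofList (((mySplit "(setb".toList code.toList).headD [])
          ++ pvTail ((mySplit "(setb".toList code.toList).drop 1)) := by
  simp only [setb_brainfuck]
  rw [foldA_eq]
  rw [splitOn_eq_mySplit "(setb".toList (by decide) code.toList]

theorem mySplit_cons_pos (sep : List Char) (c : Char) (rest : List Char)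
    (h : sep.isPrefixOf (c :: rest)) :
    mySplit sep (c :: rest) = [] :: mySplit sep (rest.drop (sep.length - 1)) := by
  rw [mySplit, if_pos h]

theorem mySplit_cons_neg (sep : List Char) (c : Char) (rest : List Char)
    (h : ¬ sep.isPrefixOf (c :: rest)) (a : List Char) (b : List (List Char))
    (hX : mySplit sep rest = a :: b) :
    mySplit sep (c :: rest) = (c :: a) :: b := by
  rw [mySplit, if_neg h, hX]

theorem pvScan_cons_pos (c : Char) (cs : List Char)
    (h : "(setb".toList.isPrefixOf (c :: cs)) :
    pvScan (c :: cs)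
      = "(zero)".toList
        ++ (pvScanTok (cs.drop 4)).1.reverse.foldl
            (fun o d => (if d = '1' then o ++ ['+'] else o) ++ "(up)".toList) []
        ++ (List.replicate (pvScanTok (cs.drop 4)).1.length "(down)".toList).flatten
        ++ pvScan (pvScanTok (cs.drop 4)).2 := by
  rw [pvScan]
  simp only [if_pos h]

theorem pvScan_cons_neg (c : Char) (cs : List Char)
    (h : ¬ "(setb".toList.isPrefixOf (c :: cs)) :
    pvScan (c :: cs) = c :: pvScan cs := by
  rw [pvScan]
  simp only [if_neg h]

theorem pv_base :
    ((mySplit "(setb".toList []).headD [] ++ pvTail ((mySplit "(setb".toList []).drop 1) = pvScan [])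
    ∧ ((pvScanTok []).1 = (mySplit [')'] ((mySplit "(setb".toList []).headD [])).headD []
       ∧ pvScan (pvScanTok []).2
         = PySem.Chars.join [')'] ((mySplit [')'] ((mySplit "(setb".toList []).headD [])).drop 1)
           ++ pvTail ((mySplit "(setb".toList []).drop 1)) := by
  refine ⟨?_, ?_, ?_⟩
  · simp [mySplit, pvTail, pvScan]
  · simp [mySplit, pvScanTok]
  · rw [show (pvScanTok []).2 = [] by simp [pvScanTok]]
    rw [show mySplit "(setb".toList [] = [[]] by rw [mySplit]]
    simp only [List.headD_cons]
    rw [show mySplit [')'] [] = [[]] by rw [mySplit]]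
    simp [pvScan, pvTail]

theorem pv_main : ∀ (n : Nat) (l : List Char), l.length ≤ n →
    ((mySplit "(setb".toList l).headD [] ++ pvTail ((mySplit "(setb".toList l).drop 1) = pvScan l)
    ∧ ((pvScanTok l).1 = (mySplit [')'] ((mySplit "(setb".toList l).headD [])).headD []
       ∧ pvScan (pvScanTok l).2
         = PySem.Chars.join [')'] ((mySplit [')'] ((mySplit "(setb".toList l).headD [])).drop 1)
           ++ pvTail ((mySplit "(setb".toList l).drop 1)) := by
  intro n
  induction n with
  | zero =>
      intro l hl
      rw [List.eq_nil_of_length_eq_zero (Nat.le_zero.mp hl)]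
      exact pv_base
  | succ nn ih =>
      intro l hl
      cases l with
      | nil => exact pv_base
      | cons c cs =>
          have hcs : cs.length ≤ nn := by simp only [List.length_cons] at hl; omega
          by_cases hS : "(setb".toList.isPrefixOf (c :: cs)
          · -- a "(setb" token starts here
            have hl' : (cs.drop 4).length ≤ nn := by
              have : (cs.drop 4).length ≤ cs.length := by simp
              omega
            obtain ⟨q0, qt, hq⟩ : ∃ a b, mySplit "(setb".toList (cs.drop 4) = a :: b := by
              cases hX : mySplit "(setb".toList (cs.drop 4) with
              | nil => exact absurd hX (mySplit_ne_nil _ _)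
              | cons a b => exact ⟨a, b, rfl⟩
            have IH' := ih (cs.drop 4) hl'
            rw [hq] at IH'
            simp only [List.headD_cons, List.drop_succ_cons, List.drop_zero] at IH'
            have hsplit : mySplit "(setb".toList (c :: cs) = [] :: q0 :: qt := by
              rw [mySplit_cons_pos _ _ _ hS,
                  show "(setb".toList.length - 1 = 4 by decide, hq]
            have hscan : pvScan (c :: cs) = pvBody q0 ++ pvTail qt := by
              rw [pvScan_cons_pos c cs hS, IH'.2.1, IH'.2.2, foldl_digits]
              simp [pvBody, pvExpand, List.append_assoc]
            have hc : c = '(' := by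
              have h5 : ('(' :: "setb".toList).isPrefixOf (c :: cs) = true := hS
              rw [List.isPrefixOf] at h5
              have := (Bool.and_eq_true _ _).mp h5
              exact (beq_iff_eq.mp this.1).symm
            have htok : pvScanTok (c :: cs) = ([], c :: cs) := by
              rw [pvScanTok]
              rw [if_neg (by rw [hc]; decide), if_pos hS]
            refine ⟨?_, ?_, ?_⟩
            · rw [hsplit, hscan]
              simp [pvTail]
            · rw [hsplit, htok]
              simp only [List.headD_cons]
              rw [show mySplit [')'] [] = [[]] by rw [mySplit]]
              simp
            · rw [hsplit, htok]
              simp only [List.headD_cons, List.drop_succ_cons, List.drop_zero]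
              rw [show mySplit [')'] [] = [[]] by rw [mySplit]]
              simp only [List.headD_cons, List.drop_succ_cons, List.drop_zero]
              rw [hscan]
              rw [show PySem.Chars.join [')'] [] = [] by decide]
              simp [pvTail]
          · -- ordinary character
            obtain ⟨h, t, hX⟩ : ∃ a b, mySplit "(setb".toList cs = a :: b := by
              cases hY : mySplit "(setb".toList cs with
              | nil => exact absurd hY (mySplit_ne_nil _ _)
              | cons a b => exact ⟨a, b, rfl⟩
            have IHcs := ih cs hcs
            rw [hX] at IHcs
            simp only [List.headD_cons, List.drop_succ_cons, List.drop_zero] at IHcs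
            have hsplit : mySplit "(setb".toList (c :: cs) = (c :: h) :: t :=
              mySplit_cons_neg _ _ _ hS _ _ hX
            refine ⟨?_, ?_, ?_⟩
            · rw [hsplit, pvScan_cons_neg _ _ hS]
              simp only [List.headD_cons, List.drop_succ_cons, List.drop_zero]
              rw [← IHcs.1]
              simp
            · by_cases hc : c = ')'
              · subst hc
                rw [hsplit]
                rw [show pvScanTok (')' :: cs) = ([], cs) by rw [pvScanTok]; simp]
                simp only [List.headD_cons]
                rw [mySplit_cons_pos [')'] ')' h (by simp [List.isPrefixOf])]
                simp
              · obtain ⟨a, b, hA⟩ : ∃ a b, mySplit [')'] h = a :: b := by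
                  cases hY : mySplit [')'] h with
                  | nil => exact absurd hY (mySplit_ne_nil _ _)
                  | cons a b => exact ⟨a, b, rfl⟩
                rw [hsplit]
                rw [show pvScanTok (c :: cs) = (c :: (pvScanTok cs).1, (pvScanTok cs).2) by
                  rw [pvScanTok]; rw [if_neg hc, if_neg hS]]
                simp only [List.headD_cons]
                have hnp : ¬ List.isPrefixOf [')'] (c :: h) = true := by
                  intro hpre
                  have h2 : ')' = c := by simpa [List.isPrefixOf] using hpre
                  exact hc h2.symm
                rw [mySplit_cons_neg [')'] c h hnp _ _ hA]
                simp only [List.headD_cons]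
                rw [hA] at IHcs
                simp only [List.headD_cons] at IHcs
                rw [IHcs.2.1]
            · by_cases hc : c = ')'
              · subst hc
                rw [hsplit]
                rw [show pvScanTok (')' :: cs) = ([], cs) by rw [pvScanTok]; simp]
                simp only [List.headD_cons, List.drop_succ_cons, List.drop_zero]
                rw [mySplit_cons_pos [')'] ')' h (by simp [List.isPrefixOf])]
                simp only [List.headD_cons, List.drop_succ_cons, List.drop_zero,
                  List.length_singleton, Nat.sub_self]
                rw [join_mySplit h]
                exact IHcs.1.symm
              · obtain ⟨a, b, hA⟩ : ∃ a b, mySplit [')'] h = a :: b := by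
                  cases hY : mySplit [')'] h with
                  | nil => exact absurd hY (mySplit_ne_nil _ _)
                  | cons a b => exact ⟨a, b, rfl⟩
                rw [hsplit]
                rw [show pvScanTok (c :: cs) = (c :: (pvScanTok cs).1, (pvScanTok cs).2) by
                  rw [pvScanTok]; rw [if_neg hc, if_neg hS]]
                simp only [List.headD_cons, List.drop_succ_cons, List.drop_zero]
                have hnp : ¬ List.isPrefixOf [')'] (c :: h) = true := by
                  intro hpre
                  have h2 : ')' = c := by simpa [List.isPrefixOf] using hpre
                  exact hc h2.symm
                rw [mySplit_cons_neg [')'] c h hnp _ _ hA]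
                rw [hA] at IHcs
                simp only [List.headD_cons, List.drop_succ_cons, List.drop_zero] at IHcs ⊢
                exact IHcs.2.2

-- ===== VERDICT (by name: the statement is the Claim_ definition above) =====
theorem setb_brainfuck_spec : Claim_equal_setb_brainfuck := by
  intro code n m _
  unfold Spec_setb_brainfuck setb_brainfuck_alt
  rw [A_char]
  exact congrArg String.ofList (pv_main code.toList.length code.toList le_rfl).1
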